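-- pv_equiv track=rewrite | github.com/sailamshama/python_projects | synonyms.py | build_semantic_descriptors
-- ===== SOURCE A (Python) =====
-- def build_semantic_descriptors(sentences):
--     '''
--     return dictionary mapping words to their semantic descriptors
--     '''
--     d={}
--     for sentence in sentences:
--         for word in sentence:
--             if (word!=''):
--                 if((word in d)==False):
--                     d[word]={}
--                 for word1 in sentence:
--                     if (word!=word1):
--                         if((word1 in d[word])==False):
--                             d[word][word1]=0
--                         d[word][word1]+=1
--     keys=list(d.keys())
--     for i in keys:
--         if (d[i]=={}):
--             del d[i]
--     return d
-- ===== SOURCE B (Python) =====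
-- def build_semantic_descriptors(sentences):
--     '''
--     return dictionary mapping words to their semantic descriptors
--     '''
--     d = {}
--     for sentence in sentences:
--         cnt = {}
--         for w in sentence:
--             cnt[w] = cnt.get(w, 0) + 1
--         for w, c in cnt.items():
--             if w != '':
--                 dw = d.setdefault(w, {})
--                 for w1, c1 in cnt.items():
--                     if w1 != w:
--                         dw[w1] = dw.get(w1, 0) + c * c1
--     for w in list(d.keys()):
--         if not d[w]:
--             del d[w]
--     return d
-- ===== Notes on version B (the rewrite author's own statement) =====
-- stated objective: alternative
-- what changed: Replaces A's per-occurrence double position loop (each occurrence of each word rescans the whole sentence adding 1) by one frequency map per sentence and a single pass over distinct words that adds the product freq[w]*freq[w1] per pair, keeping A's key-creation order and the final empty-dict cleanup.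
import Mathlib
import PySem

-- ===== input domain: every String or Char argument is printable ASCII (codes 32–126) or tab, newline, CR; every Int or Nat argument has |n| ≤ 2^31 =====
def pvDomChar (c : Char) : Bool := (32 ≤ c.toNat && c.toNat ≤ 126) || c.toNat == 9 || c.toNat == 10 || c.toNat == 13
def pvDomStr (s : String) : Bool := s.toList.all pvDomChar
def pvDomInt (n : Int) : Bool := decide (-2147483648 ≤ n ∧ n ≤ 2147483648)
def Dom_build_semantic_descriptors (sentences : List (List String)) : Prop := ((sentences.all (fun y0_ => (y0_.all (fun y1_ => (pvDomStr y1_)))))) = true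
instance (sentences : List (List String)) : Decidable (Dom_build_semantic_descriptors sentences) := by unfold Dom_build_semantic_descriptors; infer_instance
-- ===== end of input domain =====

-- B replaces A's per-occurrence double position loop by one frequency map per sentence and a
-- single pass over distinct words adding freq[w]*freq[w1] per pair; same return value,
-- including key insertion order and the empty-value cleanup.

-- ===== PORT A =====
-- inner loop 'for word1 in sentence: …' mutating d[word]
def bsdInnerA (sentence : List String) (word : String) (m : PySem.Dict String Int) :
    PySem.Dict String Int :=
  sentence.foldl (fun m word1 =>
    if word ≠ word1 then
      let m := if m.contains word1 = false then m.insert word1 0 else m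
      m.insert word1 (m.getD word1 0 + 1)
    else m) m

-- body of 'for sentence in sentences:' (the 'for word in sentence' loop)
def bsdStepA (d : PySem.Dict String (PySem.Dict String Int)) (sentence : List String) :
    PySem.Dict String (PySem.Dict String Int) :=
  sentence.foldl (fun d word =>
    if word ≠ "" then
      let d := if d.contains word = false then d.insert word PySem.Dict.empty else d
      d.insert word (bsdInnerA sentence word (d.getD word PySem.Dict.empty))
    else d) d

-- 'keys=list(d.keys()); for i in keys: if d[i]=={}: del d[i]'
def bsdCleanupA (d : PySem.Dict String (PySem.Dict String Int)) :
    PySem.Dict String (PySem.Dict String Int) :=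
  d.keys.foldl (fun d i =>
    if d.getD i PySem.Dict.empty = PySem.Dict.empty then d.erase i else d) d

def build_semantic_descriptors (sentences : List (List String)) :
    List (String × List (String × Int)) :=
  let d := sentences.foldl bsdStepA PySem.Dict.empty
  let d := bsdCleanupA d
  d.items.map (fun p => (p.1, p.2.items))

-- ===== PORT B =====
-- body of 'for sentence in sentences:' — build cnt, then one pass over distinct words
def bsdStepB (d : PySem.Dict String (PySem.Dict String Int)) (sentence : List String) :
    PySem.Dict String (PySem.Dict String Int) :=
  let cnt := sentence.foldl (fun c w => c.insert w (c.getD w 0 + 1))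
    (PySem.Dict.empty : PySem.Dict String Int)
  cnt.items.foldl (fun d p =>
    if p.1 ≠ "" then
      let d := d.setdefault p.1 PySem.Dict.empty
      let dw := d.getD p.1 PySem.Dict.empty
      let dw := cnt.items.foldl (fun dw q =>
        if q.1 ≠ p.1 then dw.insert q.1 (dw.getD q.1 0 + p.2 * q.2) else dw) dw
      d.insert p.1 dw
    else d) d

-- 'for w in list(d.keys()): if not d[w]: del d[w]'
def bsdCleanupB (d : PySem.Dict String (PySem.Dict String Int)) :
    PySem.Dict String (PySem.Dict String Int) :=
  d.keys.foldl (fun d w =>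
    if d.getD w PySem.Dict.empty = PySem.Dict.empty then d.erase w else d) d

def build_semantic_descriptors_alt (sentences : List (List String)) :
    List (String × List (String × Int)) :=
  let d := sentences.foldl bsdStepB PySem.Dict.empty
  let d := bsdCleanupB d
  d.items.map (fun p => (p.1, p.2.items))

-- ===== PRECONDITION & SPEC =====
def Spec_build_semantic_descriptors (sentences : List (List String)) (out : List (String × List (String × Int))) : Prop := out = build_semantic_descriptors_alt sentences
instance (sentences : List (List String)) (out : List (String × List (String × Int))) : Decidable (Spec_build_semantic_descriptors sentences out) := by unfold Spec_build_semantic_descriptors; infer_instance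

-- ===== CLAIM (what is proved, stated in full; the proofs are below) =====
def Claim_equal_build_semantic_descriptors : Prop := ∀ (sentences : List (List String)), Dom_build_semantic_descriptors sentences → Spec_build_semantic_descriptors sentences (build_semantic_descriptors sentences)

-- ===== LEMMAS AND PROOFS =====

-- Both sides' per-sentence loops are instances of one shape: a fold that, at each key x of a
-- list (unless skipped), replaces the value at x by F x (current value, default dflt).
def pvStep {ν : Type} (skip : String → Bool) (dflt : ν) (F : String → ν → ν)
    (d : PySem.Dict String ν) (x : String) : PySem.Dict String ν :=
  if skip x then d else d.insert x (F x (d.getD x dflt))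

-- inserts at distinct keys commute when the first key is already present
lemma pvInsert_comm {ν : Type} (d : PySem.Dict String ν) (x y : String) (v w : ν)
    (hxy : x ≠ y) (hx : d.contains x = true) :
    (d.insert x v).insert y w = (d.insert y w).insert x v := by
  apply PySem.Dict.ext
  by_cases hy : d.contains y = true
  · rw [PySem.Dict.items_insert_of_contains _ w
        (by rw [PySem.Dict.contains_insert]; simp [hy]),
      PySem.Dict.items_insert_of_contains _ v hx,
      PySem.Dict.items_insert_of_contains _ v
        (by rw [PySem.Dict.contains_insert]; simp [hx]),
      PySem.Dict.items_insert_of_contains _ w hy, List.map_map, List.map_map]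
    congr 1; funext p
    by_cases hpx : p.1 = x <;> by_cases hpy : p.1 = y <;>
      simp_all [Function.comp, Ne.symm hxy]
  · have hy' : d.contains y = false := by simpa using hy
    rw [PySem.Dict.items_insert_of_not_contains _ w
        (by rw [PySem.Dict.contains_insert]; simp only [hy', Bool.or_false]
            exact beq_eq_false_iff_ne.2 (Ne.symm hxy)),
      PySem.Dict.items_insert_of_contains _ v hx,
      PySem.Dict.items_insert_of_contains _ v
        (by rw [PySem.Dict.contains_insert]; simp [hx]),
      PySem.Dict.items_insert_of_not_contains _ w hy', List.map_append]
    simp [Ne.symm hxy]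

lemma pvStep_getD_not_mem {ν : Type} (skip : String → Bool) (dflt : ν) (F : String → ν → ν)
    (L : List String) (m : PySem.Dict String ν) (x : String) (hx : x ∉ L) :
    (L.foldl (pvStep skip dflt F) m).getD x dflt = m.getD x dflt := by
  induction L generalizing m with
  | nil => rfl
  | cons y L ih =>
    have hxy : x ≠ y := fun h => hx (h ▸ List.mem_cons_self)
    have hxL : x ∉ L := fun h => hx (List.mem_cons_of_mem _ h)
    rw [List.foldl_cons, ih _ hxL]
    unfold pvStep
    split
    · rfl
    · exact PySem.Dict.getD_insert_of_ne _ _ _ hxy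

-- inserting at an already-present key not touched by the fold commutes with the fold
lemma pvStep_foldl_insert {ν : Type} (skip : String → Bool) (dflt : ν) (F : String → ν → ν)
    (L : List String) (m : PySem.Dict String ν) (x : String) (v : ν)
    (hxL : x ∉ L) (hx : m.contains x = true) :
    L.foldl (pvStep skip dflt F) (m.insert x v) = (L.foldl (pvStep skip dflt F) m).insert x v := by
  induction L generalizing m with
  | nil => rfl
  | cons y L ih =>
    have hxy : x ≠ y := fun h => hxL (h ▸ List.mem_cons_self)
    have hxL' : x ∉ L := fun h => hxL (List.mem_cons_of_mem _ h)
    rw [List.foldl_cons, List.foldl_cons]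
    have hstep : pvStep skip dflt F (m.insert x v) y
        = (pvStep skip dflt F m y).insert x v := by
      unfold pvStep
      split
      · rfl
      · rw [PySem.Dict.getD_insert_of_ne _ _ _ (Ne.symm hxy),
          pvInsert_comm m x y v _ hxy hx]
    rw [hstep]
    apply ih _ hxL'
    unfold pvStep
    split
    · exact hx
    · rw [PySem.Dict.contains_insert]; simp [hx]

-- two passes over the same duplicate-free key list compose pointwise
lemma pvStep_pass_pass {ν : Type} (skip : String → Bool) (dflt : ν) (f g : String → ν → ν)
    (L : List String) (hL : L.Nodup) (m : PySem.Dict String ν) :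
    L.foldl (pvStep skip dflt g) (L.foldl (pvStep skip dflt f) m)
      = L.foldl (pvStep skip dflt (fun x => g x ∘ f x)) m := by
  induction L generalizing m with
  | nil => rfl
  | cons x rest ih =>
    have hxr : x ∉ rest := (List.nodup_cons.1 hL).1
    have hrest : rest.Nodup := (List.nodup_cons.1 hL).2
    rw [List.foldl_cons, List.foldl_cons, List.foldl_cons]
    by_cases hs : skip x = true
    · have h1 : ∀ (G : String → ν → ν) (d : PySem.Dict String ν), pvStep skip dflt G d x = d := by
        intro G d; unfold pvStep; simp [hs]
      rw [h1, h1, h1, ih hrest]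
    · have hs' : skip x = false := by simpa using hs
      have h1 : ∀ (G : String → ν → ν) (d : PySem.Dict String ν),
          pvStep skip dflt G d x = d.insert x (G x (d.getD x dflt)) := by
        intro G d; unfold pvStep; simp [hs']
      rw [h1, h1, h1]
      set m₁ := m.insert x (f x (m.getD x dflt)) with hm₁
      have hget : (rest.foldl (pvStep skip dflt f) m₁).getD x dflt = f x (m.getD x dflt) := by
        rw [pvStep_getD_not_mem _ _ _ _ _ _ hxr, hm₁, PySem.Dict.getD_insert_self]
      rw [hget,
        ← pvStep_foldl_insert skip dflt f rest m₁ x _ hxr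
          (by rw [hm₁]; exact PySem.Dict.contains_insert_self _ _ _),
        hm₁, PySem.Dict.insert_insert_self, ih hrest]
      rfl

-- THE GROUPING LEMMA: a fold over all occurrences equals a fold over the distinct
-- elements (first-occurrence order) iterating each key's action count-many times.
lemma pvStep_group {ν : Type} (skip : String → Bool) (dflt : ν) (F : String → ν → ν)
    (s : List String) (m : PySem.Dict String ν) :
    s.foldl (pvStep skip dflt F) m
      = (PySem.Set.ofList s).foldl (pvStep skip dflt (fun x => (F x)^[s.count x])) m := by
  induction s using List.reverseRecOn generalizing m with
  | nil => rfl
  | append_singleton init x ih =>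
    rw [List.foldl_append, List.foldl_cons, List.foldl_nil, ih,
      PySem.Set.ofList_append_singleton]
    have hcongr : ∀ (L' : List String), x ∉ L' → ∀ (X : PySem.Dict String ν),
        L'.foldl (pvStep skip dflt (fun y => (F y)^[(init ++ [x]).count y])) X
          = L'.foldl (pvStep skip dflt (fun y => (F y)^[init.count y])) X := by
      intro L' hL' X
      apply PySem.List.foldl_congr_mem
      intro acc y hy
      have hyx : y ≠ x := fun h => hL' (h ▸ hy)
      have hcnt : (init ++ [x]).count y = init.count y := by
        simp [List.count_append, Ne.symm hyx]
      simp only [pvStep]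
      rw [hcnt]
    by_cases hx : x ∈ init
    · rw [PySem.Set.add_of_mem ((PySem.Set.mem_ofList init x).2 hx)]
      obtain ⟨L₁, L₂, hsplit⟩ := List.append_of_mem ((PySem.Set.mem_ofList init x).2 hx)
      have hnd := PySem.Set.nodup_ofList (α := String) init
      rw [hsplit] at hnd
      have hnd' := List.nodup_middle.1 hnd
      have hx12 : x ∉ L₁ ++ L₂ := (List.nodup_cons.1 hnd').1
      have hx1 : x ∉ L₁ := fun h => hx12 (List.mem_append_left _ h)
      have hx2 : x ∉ L₂ := fun h => hx12 (List.mem_append_right _ h)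
      rw [hsplit, List.foldl_append, List.foldl_cons, List.foldl_append, List.foldl_cons,
        hcongr L₁ hx1, hcongr L₂ hx2]
      set M := L₁.foldl (pvStep skip dflt (fun y => (F y)^[init.count y])) m with hM
      have hcx : (init ++ [x]).count x = init.count x + 1 := by
        simp [List.count_append]
      by_cases hs : skip x = true
      · have h1 : ∀ (G : String → ν → ν) (d : PySem.Dict String ν), pvStep skip dflt G d x = d := by
          intro G d; unfold pvStep; simp [hs]
        rw [h1, h1, h1]
      · have hs' : skip x = false := by simpa using hs
        have h1 : ∀ (G : String → ν → ν) (d : PySem.Dict String ν),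
            pvStep skip dflt G d x = d.insert x (G x (d.getD x dflt)) := by
          intro G d; unfold pvStep; simp [hs']
        simp only [pvStep, hs', Bool.false_eq_true, if_false]
        rw [hcx]
        set P := pvStep skip dflt (fun y => (F y)^[init.count y]) with hP
        set v₀ := M.getD x dflt with hv₀
        have hget : (L₂.foldl P (M.insert x ((F x)^[init.count x] v₀))).getD x dflt
            = (F x)^[init.count x] v₀ := by
          rw [hP, pvStep_getD_not_mem _ _ _ _ _ _ hx2, PySem.Dict.getD_insert_self]
        rw [hget,
          ← pvStep_foldl_insert skip dflt _ L₂ (M.insert x ((F x)^[init.count x] v₀)) x _ hx2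
            (PySem.Dict.contains_insert_self _ _ _),
          PySem.Dict.insert_insert_self, ← Function.iterate_succ_apply' (F x)]
    · rw [PySem.Set.add_of_not_mem (fun h => hx ((PySem.Set.mem_ofList init x).1 h)),
        List.foldl_append, List.foldl_cons, List.foldl_nil,
        hcongr (PySem.Set.ofList init) (fun h => hx ((PySem.Set.mem_ofList init x).1 h))]
      have hcx : (init ++ [x]).count x = 1 := by
        simp [List.count_append, List.count_eq_zero.2 hx]
      simp only [pvStep]
      rw [hcx, Function.iterate_one]

-- iterated (+1) adds the iteration count
lemma pvIterAddOne (c : Nat) (v : Int) : (fun v : Int => v + 1)^[c] v = v + c := by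
  induction c generalizing v with
  | zero => simp
  | succ n ih => rw [Function.iterate_succ_apply', ih]; push_cast; ring

-- A's inner loop in pvStep form
lemma pvInnerA_eq (s : List String) (w : String) (m : PySem.Dict String Int) :
    bsdInnerA s w m = s.foldl (pvStep (fun x => x == w) 0 (fun _ v => v + 1)) m := by
  unfold bsdInnerA
  apply PySem.List.foldl_congr_mem
  intro acc x _
  by_cases hx : w = x
  · subst hx; simp [pvStep]
  · by_cases hc : acc.contains x = true
    · simp [pvStep, hx, Ne.symm hx, hc]
    · have hc' : acc.contains x = false := by simpa using hc
      simp [pvStep, hx, Ne.symm hx, hc', PySem.Dict.insert_insert_self,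
        PySem.Dict.getD_insert_self, PySem.Dict.getD_of_not_contains _ _ hc']

-- B's grouped inner pass over the distinct words with multiplier a
def pvGPass (s : List String) (w : String) (a : Int) (m : PySem.Dict String Int) :
    PySem.Dict String Int :=
  (PySem.Set.ofList s).foldl
    (pvStep (fun x => x == w) 0 (fun x v => v + a * (s.count x : Int))) m

lemma pvOnePass_eq (s : List String) (w : String) (m : PySem.Dict String Int) :
    s.foldl (pvStep (fun x => x == w) 0 (fun _ v => v + 1)) m = pvGPass s w 1 m := by
  rw [pvStep_group]
  unfold pvGPass
  apply PySem.List.foldl_congr_mem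
  intro acc x _
  by_cases hxw : (x == w) = true
  · simp [pvStep, hxw]
  · simp [pvStep, hxw, pvIterAddOne]

lemma pvGPass_comp (s : List String) (w : String) (a b : Int) (m : PySem.Dict String Int) :
    pvGPass s w b (pvGPass s w a m) = pvGPass s w (a + b) m := by
  unfold pvGPass
  rw [pvStep_pass_pass _ _ _ _ _ (PySem.Set.nodup_ofList s)]
  apply PySem.List.foldl_congr_mem
  intro acc x _
  by_cases hxw : (x == w) = true
  · simp [pvStep, hxw]
  · have hxw' : (x == w) = false := by simpa using hxw
    simp only [pvStep, hxw', Bool.false_eq_true, if_false, Function.comp]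
    congr 1
    ring

lemma pvOnePass_iter (s : List String) (w : String) (c : Nat) (hc : 1 ≤ c)
    (m : PySem.Dict String Int) :
    (fun m => s.foldl (pvStep (fun x => x == w) 0 (fun _ v => v + 1)) m)^[c] m
      = pvGPass s w (c : Int) m := by
  induction c, hc using Nat.le_induction generalizing m with
  | base => rw [Function.iterate_one]; exact_mod_cast pvOnePass_eq s w m
  | succ n hn ih =>
    rw [Function.iterate_succ_apply', ih, pvOnePass_eq, pvGPass_comp]
    push_cast; ring_nf

-- A's per-sentence step in grouped form
lemma pvStepA_eq (d : PySem.Dict String (PySem.Dict String Int)) (s : List String) :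
    bsdStepA d s
      = (PySem.Set.ofList s).foldl
          (pvStep (fun w => w == "") PySem.Dict.empty
            (fun w => pvGPass s w (s.count w : Int))) d := by
  unfold bsdStepA
  have h1 : s.foldl (fun d word =>
      if word ≠ "" then
        let d := if d.contains word = false then d.insert word PySem.Dict.empty else d
        d.insert word (bsdInnerA s word (d.getD word PySem.Dict.empty))
      else d) d
      = s.foldl (pvStep (fun w => w == "") PySem.Dict.empty (fun w => bsdInnerA s w)) d := by
    apply PySem.List.foldl_congr_mem
    intro acc w _
    by_cases hw : w = ""
    · subst hw; simp [pvStep]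
    · by_cases hc : acc.contains w = true
      · simp [pvStep, hw, hc]
      · have hc' : acc.contains w = false := by simpa using hc
        simp [pvStep, hw, hc', PySem.Dict.insert_insert_self,
          PySem.Dict.getD_insert_self, PySem.Dict.getD_of_not_contains _ _ hc']
  rw [h1, pvStep_group]
  apply PySem.List.foldl_congr_mem
  intro acc w hw
  have hws : w ∈ s := (PySem.Set.mem_ofList s w).1 hw
  have hc1 : 1 ≤ s.count w := List.count_pos_iff.2 hws
  have hfun : bsdInnerA s w = fun m => s.foldl (pvStep (fun x => x == w) 0 (fun _ v => v + 1)) m :=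
    funext (pvInnerA_eq s w)
  by_cases hw0 : (w == "") = true
  · simp [pvStep, hw0]
  · have hw0' : (w == "") = false := by simpa using hw0
    simp only [pvStep, hw0', Bool.false_eq_true, if_false]
    rw [hfun, pvOnePass_iter s w (s.count w) hc1]

-- B's per-sentence step in the same grouped form
lemma pvStepB_eq (d : PySem.Dict String (PySem.Dict String Int)) (s : List String) :
    bsdStepB d s
      = (PySem.Set.ofList s).foldl
          (pvStep (fun w => w == "") PySem.Dict.empty
            (fun w => pvGPass s w (s.count w : Int))) d := by
  unfold bsdStepB
  simp only [PySem.Dict.foldl_insert_getD_add_one_eq_counter, PySem.Dict.items_counter,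
    List.foldl_map]
  apply PySem.List.foldl_congr_mem
  intro acc w _
  by_cases hw : w = ""
  · subst hw; simp [pvStep]
  · have hgp : ∀ (dw : PySem.Dict String Int),
        (PySem.Set.ofList s).foldl (fun dw x =>
            if x = w then dw
            else dw.insert x (dw.getD x 0 + (s.count w : Int) * (s.count x : Int))) dw
          = pvGPass s w (s.count w : Int) dw := by
      intro dw
      unfold pvGPass
      apply PySem.List.foldl_congr_mem
      intro mm x _
      by_cases hxw : x = w
      · subst hxw; simp [pvStep]
      · simp [pvStep, hxw]
    by_cases hcon : acc.contains w = true
    · simp only [pvStep, PySem.Dict.setdefault_of_contains _ _ hcon, ne_eq, ite_not,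
        beq_iff_eq, hw, if_false]
      rw [hgp]
    · have hcon' : acc.contains w = false := by simpa using hcon
      simp only [pvStep, PySem.Dict.setdefault_of_not_contains _ _ hcon',
        PySem.Dict.getD_insert_self, PySem.Dict.insert_insert_self,
        PySem.Dict.getD_of_not_contains _ _ hcon', ne_eq, ite_not, beq_iff_eq, hw,
        if_false]
      rw [hgp]

lemma pvStep_AB (d : PySem.Dict String (PySem.Dict String Int)) (s : List String) :
    bsdStepA d s = bsdStepB d s := (pvStepA_eq d s).trans (pvStepB_eq d s).symm

-- ===== VERDICT (by name: the statement is the Claim_ definition above) =====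
theorem build_semantic_descriptors_spec : Claim_equal_build_semantic_descriptors := by
  intro sentences _
  unfold Spec_build_semantic_descriptors
  unfold build_semantic_descriptors build_semantic_descriptors_alt
  have hfold : sentences.foldl bsdStepA PySem.Dict.empty
      = sentences.foldl bsdStepB PySem.Dict.empty :=
    PySem.List.foldl_congr_mem _ _ _ _ (fun acc s _ => pvStep_AB acc s)
  rw [hfold]
  rfl
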